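-- pv_equiv track=rewrite | github.com/jrodriguezgar/FormuLite | shortfx/fxNumeric/arithmetic_functions.py | stern_brocot
-- ===== SOURCE A (Python) =====
-- def stern_brocot(n: int) -> list[int]:
--     """Generate the first n terms of the Stern-Brocot sequence.
--
--     s(0)=0, s(1)=1, s(2k)=s(k), s(2k+1)=s(k)+s(k+1).
--
--     Args:
--         n: Number of terms to generate (≥ 1).
--
--     Returns:
--         List of first n terms.
--
--     Raises:
--         TypeError: If n is not an integer.
--         ValueError: If n < 1.
--
--     Usage Example:
--         >>> stern_brocot(10)
--         [0, 1, 1, 2, 1, 3, 2, 3, 1, 4]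
--
--     Complexity: O(n)
--     """
--     if not isinstance(n, int):
--         raise TypeError("n must be an integer.")
--     if n < 1:
--         raise ValueError("n must be positive.")
--     if n == 1:
--         return [0]
--     seq = [0, 1]
--     for i in range(2, n):
--         if i % 2 == 0:
--             seq.append(seq[i // 2])
--         else:
--             seq.append(seq[i // 2] + seq[i // 2 + 1])
--     return seq
-- ===== SOURCE B (Python) =====
-- from collections import deque
--
-- def stern_brocot(n: int) -> list[int]:
--     """Generate the first n Stern-Brocot terms via a rolling FIFO queue."""
--     if not isinstance(n, int):
--         raise TypeError("n must be an integer.")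
--     if n < 1:
--         raise ValueError("n must be positive.")
--     res = [0]
--     q = deque([1, 1])
--     while len(res) < n:
--         a = q.popleft()
--         res.append(a)
--         q.append(a + q[0])
--         q.append(q[0])
--     return res
-- ===== Notes on version B (the rewrite author's own statement) =====
-- stated objective: alternative
-- what changed: Replaces back-indexing into the growing list (seq[i//2], seq[i//2+1]) with a rolling FIFO queue of pending terms: pop a, emit it, and push a+front and front; no indexing and no special-cased singleton return.
import Mathlib
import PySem

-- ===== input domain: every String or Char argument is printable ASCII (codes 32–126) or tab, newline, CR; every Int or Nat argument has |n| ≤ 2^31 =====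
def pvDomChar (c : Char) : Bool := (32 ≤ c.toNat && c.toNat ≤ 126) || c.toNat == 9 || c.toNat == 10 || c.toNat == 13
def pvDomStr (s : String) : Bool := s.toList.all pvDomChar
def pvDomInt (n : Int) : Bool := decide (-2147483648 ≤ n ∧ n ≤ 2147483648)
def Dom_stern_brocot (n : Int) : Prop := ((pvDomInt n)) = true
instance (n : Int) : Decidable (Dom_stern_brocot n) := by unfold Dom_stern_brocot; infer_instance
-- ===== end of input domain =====

-- B replaces A's back-indexing into the growing list with a rolling FIFO queue of
-- pending terms (alternative decomposition, same O(n) cost); equal on n ≥ 1 (A raises otherwise).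

-- ===== PORT A =====
-- A: seq = [0,1]; for i in range(2,n): append seq[i//2] (i even) or seq[i//2]+seq[i//2+1] (i odd).
-- seq[...] indices are always in range here, so xs[i] is ported as pyGetD with an unreachable default.
def stern_brocot (n : Int) : List Int :=
  if n < 1 then []           -- Python raises ValueError here (excluded by Pre_)
  else if n = 1 then [0]
  else
    (PySem.List.pyRange 2 n 1).foldl
      (fun seq i =>
        if PySem.Int.mod i 2 = 0 then
          seq ++ [PySem.List.pyGetD seq (PySem.Int.floordiv i 2) 0]
        else
          seq ++ [PySem.List.pyGetD seq (PySem.Int.floordiv i 2) 0 +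
                  PySem.List.pyGetD seq (PySem.Int.floordiv i 2 + 1) 0])
      [0, 1]

-- ===== PORT B =====
-- while len(res) < n: a = q.popleft(); res.append(a); q.append(a + q[0]); q.append(q[0])
-- Fuel = n - len(res), which decreases by exactly 1 per iteration.
def sbLoop : Nat → List Int → List Int → List Int
  | 0, res, _ => res
  | fuel + 1, res, q =>
    match q with
    | a :: b :: rest => sbLoop fuel (res ++ [a]) (b :: (rest ++ [a + b, b]))
    | _ => res  -- unreachable: the queue always holds ≥ 2 elements

def stern_brocot_alt (n : Int) : List Int :=
  if n < 1 then []           -- Python raises ValueError here (excluded by Pre_)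
  else sbLoop (n - 1).toNat [0] [1, 1]

-- ===== PRECONDITION & SPEC =====
-- Pre_ excludes exactly n < 1, where the Python A raises ValueError.
def Pre_stern_brocot (n : Int) : Prop := 1 ≤ n
instance (n : Int) : Decidable (Pre_stern_brocot n) := by unfold Pre_stern_brocot; infer_instance
def pvWitness_stern_brocot : Int := (10)

def Spec_stern_brocot (n : Int) (out : List Int) : Prop := out = stern_brocot_alt n
instance (n : Int) (out : List Int) : Decidable (Spec_stern_brocot n out) := by unfold Spec_stern_brocot; infer_instance

-- ===== CLAIM (what is proved, stated in full; the proofs are below) =====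
def Claim_equal_stern_brocot : Prop := ∀ (n : Int), Dom_stern_brocot n → Pre_stern_brocot n → Spec_stern_brocot n (stern_brocot n)

-- ===== LEMMAS AND PROOFS =====

def sb : Nat → Int
  | 0 => 0
  | 1 => 1
  | m + 2 =>
    if h : (m + 2) % 2 = 0 then sb (m / 2 + 1)
    else sb (m / 2 + 1) + sb (m / 2 + 2)
  termination_by m => m
  decreasing_by all_goals omega

lemma sb_two_mul (k : Nat) (hk : 1 ≤ k) : sb (2 * k) = sb k := by
  obtain ⟨j, rfl⟩ : ∃ j, k = j + 1 := ⟨k - 1, by omega⟩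
  have : 2 * (j + 1) = 2 * j + 2 := by ring
  rw [this, sb]
  rw [dif_pos (by omega)]
  congr 1
  omega

lemma sb_odd (k : Nat) (hk : 1 ≤ k) : sb (2 * k + 1) = sb k + sb (k + 1) := by
  obtain ⟨j, rfl⟩ : ∃ j, k = j + 1 := ⟨k - 1, by omega⟩
  have : 2 * (j + 1) + 1 = (2 * j + 1) + 2 := by ring
  rw [this, sb]
  rw [dif_neg (by omega)]
  have h1 : (2 * j + 1) / 2 + 1 = j + 1 := by omega
  have h2 : (2 * j + 1) / 2 + 2 = j + 1 + 1 := by omega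
  rw [h1, h2]

lemma B_loop (k : Nat) : ∀ (m : Nat), 1 ≤ m → ∀ (res : List Int),
    sbLoop k res ((List.range' m (m + 1)).map sb) = res ++ (List.range' m k).map sb := by
  induction k with
  | zero => intro m hm res; simp [sbLoop]
  | succ k ih =>
    intro m hm res
    have hq : List.range' m (m + 1) = m :: (m + 1) :: List.range' (m + 2) (m - 1) := by
      rw [List.range'_succ]
      congr 1
      have : m = (m - 1) + 1 := by omega
      rw [this, List.range'_succ]
      congr 2 <;> omega
    rw [hq]
    simp only [List.map_cons, sbLoop]
    have hq2 : (List.range' (m + 1) (m + 2)).map sb =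
        sb (m + 1) :: ((List.range' (m + 2) (m - 1)).map sb ++ [sb m + sb (m + 1), sb (m + 1)]) := by
      have : List.range' (m + 1) (m + 2) = (m + 1) :: (List.range' (m + 2) (m - 1) ++ [2 * m + 1, 2 * m + 2]) := by
        rw [List.range'_succ]
        congr 1
        have h2 : List.range' (m + 2) (m - 1) 1 ++ List.range' (m + 2 + 1 * (m - 1)) 2 1 = List.range' (m + 2) ((m - 1) + 2) 1 := List.range'_append
        have h3 : m + 1 = (m - 1) + 2 := by omega
        rw [show m + 1 + 1 = m + 2 by omega, h3, ← h2]
        congr 1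
        have : m + 2 + 1 * (m - 1) = 2 * m + 1 := by omega
        rw [this]
        rfl
      rw [this]
      simp only [List.map_append, List.map]
      have e1 : sb (2 * m + 1) = sb m + sb (m + 1) := sb_odd m hm
      have e2 : sb (2 * m + 2) = sb (m + 1) := by
        rw [show 2 * m + 2 = 2 * (m + 1) by ring, sb_two_mul (m + 1) (by omega)]
      rw [e1, e2]
    rw [← hq2, ih (m + 1) (by omega)]
    have : List.range' m (k + 1) = m :: List.range' (m + 1) k := List.range'_succ ..
    rw [this]
    simp

lemma A_fold (m : Nat) (hm : 2 ≤ m) :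
    (PySem.List.pyRange 2 (m : Int) 1).foldl
      (fun seq i =>
        if PySem.Int.mod i 2 = 0 then
          seq ++ [PySem.List.pyGetD seq (PySem.Int.floordiv i 2) 0]
        else
          seq ++ [PySem.List.pyGetD seq (PySem.Int.floordiv i 2) 0 +
                  PySem.List.pyGetD seq (PySem.Int.floordiv i 2 + 1) 0])
      [0, 1] = (List.range m).map sb := by
  induction m with
  | zero => omega
  | succ m ih =>
    rcases Nat.lt_or_ge m 2 with h2 | h2
    · interval_cases m
      · omega
      · have hc : ((1 + 1 : Nat) : Int) = 2 := by norm_num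
        rw [hc, PySem.List.pyRange_one_eq_nil (by norm_num)]
        simp [List.range_succ, sb]
    · have hr : PySem.List.pyRange 2 ((m + 1 : Nat) : Int) 1
          = PySem.List.pyRange 2 (m : Int) 1 ++ [(m : Int)] := by
        push_cast
        exact PySem.List.pyRange_one_succ_right (by exact_mod_cast h2)
      rw [hr, List.foldl_append, ih h2]
      simp only [List.foldl]
      have hmod : PySem.Int.mod (m : Int) 2 = ((m % 2 : Nat) : Int) := by
        exact_mod_cast PySem.Int.mod_natCast m 2
      have hdiv : PySem.Int.floordiv (m : Int) 2 = ((m / 2 : Nat) : Int) := by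
        exact_mod_cast PySem.Int.floordiv_natCast m 2
      have hget : ∀ k : Nat, k < m →
          PySem.List.pyGetD ((List.range m).map sb) ((k : Nat) : Int) 0 = sb k := by
        intro k hk
        rw [PySem.List.pyGetD_natCast]
        simp [List.getD, hk]
      rw [hmod, hdiv]
      rcases Nat.even_or_odd m with he | ho
      · have hm2 : m % 2 = 0 := Nat.even_iff.mp he
        rw [hm2]
        simp only [Nat.cast_zero]
        simp only [if_true]
        rw [hget (m / 2) (by omega)]
        rw [List.range_succ, List.map_append, List.map]
        have : sb m = sb (m / 2) := by
          conv_lhs => rw [show m = 2 * (m / 2) by omega]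
          exact sb_two_mul (m / 2) (by omega)
        rw [this]
        simp
      · have hm2 : m % 2 = 1 := Nat.odd_iff.mp ho
        rw [hm2]
        simp only [Nat.cast_one]
        rw [if_neg (by norm_num)]
        have hc : ((m / 2 : Nat) : Int) + 1 = ((m / 2 + 1 : Nat) : Int) := by push_cast; ring
        rw [hc, hget (m / 2) (by omega), hget (m / 2 + 1) (by omega)]
        rw [List.range_succ, List.map_append, List.map]
        have : sb m = sb (m / 2) + sb (m / 2 + 1) := by
          rw [show m = 2 * (m / 2) + 1 by omega, sb_odd (m / 2) (by omega)]
          congr 2 <;> omega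
        rw [this]
        simp

-- ===== VERDICT (by name: the statement is the Claim_ definition above) =====
theorem stern_brocot_spec : Claim_equal_stern_brocot := by
  intro n _ hpre
  unfold Spec_stern_brocot stern_brocot stern_brocot_alt
  have hpre' : 1 ≤ n := hpre
  have hn1 : ¬ n < 1 := by omega
  rw [if_neg hn1, if_neg hn1]
  have hq : ([1, 1] : List Int) = (List.range' 1 2).map sb := by
    have h1 : sb 1 = 1 := by simp [sb]
    have h2 : sb 2 = 1 := by simp [sb]
    simp [List.range'_succ, h1, h2]
  rw [hq, B_loop _ 1 (by norm_num)]
  by_cases h1 : n = 1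
  · subst h1
    simp
  · rw [if_neg h1]
    have hm : 2 ≤ n.toNat := by omega
    have hcast : ((n.toNat : Nat) : Int) = n := by omega
    rw [← hcast, A_fold n.toNat hm]
    have ht : ((n.toNat : Int) - 1).toNat = n.toNat - 1 := by omega
    rw [ht]
    have hr : List.range n.toNat = 0 :: List.range' 1 (n.toNat - 1) := by
      rw [List.range_eq_range']
      rw [show n.toNat = (n.toNat - 1) + 1 by omega, List.range'_succ]
      norm_num
    rw [hr]
    have h0 : sb 0 = 0 := by simp [sb]
    simp [h0]
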